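-- pv_equiv track=rewrite | github.com/drizztSun/common_project | PythonLeetcode/leetcodeM/1062_LongestRepeatingSubstring.py | doit_binary_search
-- ===== SOURCE A (Python) =====
-- def doit_binary_search(S: str) -> str:
--
--     n = len(S)
--
--     def search(L: int, n: int, S: str) -> str:
--         """
--         Search a substring of given length
--         that occurs at least 2 times.
--         @return start position if the substring exits and -1 otherwise.
--         """
--         seen = set()
--         for start in range(0, n - L + 1):
--             tmp = S[start:start + L]
--             if tmp in seen:
--                 return start
--             seen.add(tmp)
--         return -1
--
--     # binary search, L = repeating string length
--     left, right = 1, n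
--
--     while left <= right:
--
--         L = left + (right - left) // 2
--
--         if search(L, n, S) != -1:
--             left = L + 1
--
--         else:
--             right = L - 1
--
--     return left - 1
-- ===== SOURCE B (Python) =====
-- def doit_binary_search(S: str) -> str:
--     # Longest repeating substring length via pairwise longest-common-extension:
--     # the answer is the maximum, over all start pairs i < j, of the length of the
--     # longest common prefix of the suffixes starting at i and j.
--     n = len(S)
--     best = 0
--     for i in range(n):
--         for j in range(i + 1, n):
--             k = 0
--             while j + k < n and S[i + k] == S[j + k]:
--                 k += 1
--             if k > best:
--                 best = k
--     return best
-- ===== Notes on version B (the rewrite author's own statement) =====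
-- stated objective: alternative
-- what changed: Replaced the binary search over candidate lengths with a per-length duplicate-substring hash set by a direct maximisation of the longest common extension over all pairs of start positions, with no binary search, no slicing and no set.
import Mathlib
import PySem

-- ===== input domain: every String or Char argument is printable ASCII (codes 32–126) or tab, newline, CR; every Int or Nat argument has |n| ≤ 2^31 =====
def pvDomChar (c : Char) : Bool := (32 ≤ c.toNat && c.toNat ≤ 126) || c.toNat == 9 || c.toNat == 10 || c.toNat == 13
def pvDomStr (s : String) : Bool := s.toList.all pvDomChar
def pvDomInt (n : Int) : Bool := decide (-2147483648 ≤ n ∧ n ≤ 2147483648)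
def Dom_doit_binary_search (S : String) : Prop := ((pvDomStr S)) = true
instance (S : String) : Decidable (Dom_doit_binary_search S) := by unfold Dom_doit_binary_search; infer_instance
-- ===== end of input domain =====

-- B replaces A's binary search over lengths (duplicate-substring set per length) by a direct
-- pairwise longest-common-extension maximisation; objective: alternative algorithm.

-- ===== PORT A =====
-- inner loop of A's `search`: scan starts, first duplicate slice wins
def searchLoopA (S : String) (L : Int) : List Int → PySem.Set String → Int
  | [], _ => -1
  | start :: rest, seen =>
    if PySem.Set.contains seen (PySem.Str.slice S (some start) (some (start + L))) then start
    else searchLoopA S L rest (PySem.Set.add seen (PySem.Str.slice S (some start) (some (start + L))))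

def searchA (L n : Int) (S : String) : Int :=
  searchLoopA S L (PySem.List.pyRange 0 (n - L + 1) 1) PySem.Set.empty

def bsLoopA (S : String) (n left right : Int) : Int :=
  if _h : left ≤ right then
    let L := left + PySem.Int.floordiv (right - left) 2
    if searchA L n S ≠ -1 then bsLoopA S n (L + 1) right
    else bsLoopA S n left (L - 1)
  else left - 1
termination_by (right + 1 - left).toNat
decreasing_by
  all_goals
    rw [PySem.Int.floordiv_eq_ediv_of_pos (by norm_num : (0:Int) < 2)]
    omega

def doit_binary_search (S : String) : Int :=
  let n : Int := PySem.Str.len S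
  bsLoopA S n 1 n

-- ===== PORT B =====
-- while j + k < n and S[i+k] == S[j+k]: k += 1
def lcpLoopB (S : String) (i j n k : Int) : Int :=
  if _h : j + k < n then
    if PySem.Str.pyGet? S (i + k) = PySem.Str.pyGet? S (j + k) then lcpLoopB S i j n (k + 1)
    else k
  else k
termination_by (n - (j + k)).toNat
decreasing_by omega

def doit_binary_search_alt (S : String) : Int :=
  let n : Int := PySem.Str.len S
  (PySem.List.pyRange 0 n 1).foldl (fun best i =>
    (PySem.List.pyRange (i + 1) n 1).foldl (fun best j =>
      let k := lcpLoopB S i j n 0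
      if k > best then k else best) best) 0

-- ===== PRECONDITION & SPEC =====
def Spec_doit_binary_search (S : String) (out : Int) : Prop := out = doit_binary_search_alt S
instance (S : String) (out : Int) : Decidable (Spec_doit_binary_search S out) := by unfold Spec_doit_binary_search; infer_instance

-- ===== CLAIM (what is proved, stated in full; the proofs are below) =====
def Claim_equal_doit_binary_search : Prop := ∀ (S : String), Dom_doit_binary_search S → Spec_doit_binary_search S (doit_binary_search S)

-- ===== LEMMAS AND PROOFS =====

-- longest common prefix of two suffixes, the mathematical object both programs compute with
def lcpN : List Char → List Char → Nat
  | a :: as, b :: bs => if a = b then lcpN as bs + 1 else 0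
  | _, _ => 0

theorem lcpN_nil_right (xs : List Char) : lcpN xs [] = 0 := by cases xs <;> rfl

theorem lcpN_le (xs ys : List Char) : lcpN xs ys ≤ ys.length := by
  induction xs generalizing ys with
  | nil => cases ys <;> simp [lcpN]
  | cons a as ih =>
    cases ys with
    | nil => simp [lcpN]
    | cons b bs =>
      rw [lcpN]
      split_ifs
      · have := ih bs; simp only [List.length_cons]; omega
      · simp

theorem take_eq_take_iff_lcpN (L : Nat) (xs ys : List Char)
    (hx : L ≤ xs.length) (hy : L ≤ ys.length) :
    xs.take L = ys.take L ↔ L ≤ lcpN xs ys := by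
  induction L generalizing xs ys with
  | zero => simp
  | succ L ih =>
    cases xs with
    | nil => simp at hx
    | cons a as =>
      cases ys with
      | nil => simp at hy
      | cons b bs =>
        by_cases h : a = b
        · subst h
          rw [show lcpN (a :: as) (a :: bs) = lcpN as bs + 1 from by rw [lcpN, if_pos rfl]]
          simp only [List.take_succ_cons, List.cons.injEq, true_and]
          rw [ih as bs (by simpa using hx) (by simpa using hy)]
          omega
        · simp [lcpN, h]

-- B's inner while-loop computes the longest common extension
theorem lcpLoopB_spec (S : String) (i j : Nat) (hij : i ≤ j) :
    ∀ (d k : Nat), S.toList.length - (j + k) ≤ d →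
      lcpLoopB S (i : Int) (j : Int) (PySem.Str.len S) (k : Int)
        = (k : Int) + (lcpN (S.toList.drop (i + k)) (S.toList.drop (j + k)) : Int) := by
  intro d
  induction d with
  | zero =>
    intro k hk
    rw [lcpLoopB, dif_neg (by rw [PySem.Str.len_eq]; omega)]
    rw [show S.toList.drop (j + k) = [] from List.drop_eq_nil_of_le (by omega), lcpN_nil_right]
    simp
  | succ d ih =>
    intro k hk
    by_cases h : j + k < S.toList.length
    · rw [lcpLoopB, dif_pos (by rw [PySem.Str.len_eq]; omega)]
      have hi : i + k < S.toList.length := by omega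
      have hgi : PySem.Str.pyGet? S ((i : Int) + (k : Int)) = some (S.toList[i + k]'hi) := by
        rw [show (i : Int) + (k : Int) = ((i + k : Nat) : Int) from by push_cast; ring,
          PySem.Str.pyGet?_natCast, List.getElem?_eq_getElem hi]
      have hgj : PySem.Str.pyGet? S ((j : Int) + (k : Int)) = some (S.toList[j + k]'h) := by
        rw [show (j : Int) + (k : Int) = ((j + k : Nat) : Int) from by push_cast; ring,
          PySem.Str.pyGet?_natCast, List.getElem?_eq_getElem h]
      rw [hgi, hgj, List.drop_eq_getElem_cons hi, List.drop_eq_getElem_cons h]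
      by_cases hab : S.toList[i + k]'hi = S.toList[j + k]'h
      · rw [if_pos (show some (S.toList[i + k]'hi) = some (S.toList[j + k]'h) from by rw [hab]),
          lcpN, if_pos hab]
        have hrec := ih (k + 1) (by omega)
        rw [show i + (k + 1) = i + k + 1 from by omega,
          show j + (k + 1) = j + k + 1 from by omega] at hrec
        push_cast at hrec
        rw [hrec]
        push_cast
        ring
      · rw [if_neg (by simpa using hab), lcpN, if_neg hab]
        simp
    · rw [lcpLoopB, dif_neg (by rw [PySem.Str.len_eq]; omega)]
      rw [show S.toList.drop (j + k) = [] from List.drop_eq_nil_of_le (by omega), lcpN_nil_right]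
      simp

theorem lcpLoopB_eq (S : String) (i j : Nat) (hij : i ≤ j) :
    lcpLoopB S (i : Int) (j : Int) (PySem.Str.len S) 0
      = (lcpN (S.toList.drop i) (S.toList.drop j) : Int) := by
  have h := lcpLoopB_spec S i j hij S.toList.length 0 (by omega)
  simpa using h

-- A's set-scan returns -1 exactly when the listed slices are pairwise distinct (and unseen)
theorem searchLoopA_neg_one_iff (S : String) (L : Int) :
    ∀ (starts : List Int) (seen : PySem.Set String), (∀ s ∈ starts, 0 ≤ s) →
      (searchLoopA S L starts seen = -1 ↔
        (∀ s ∈ starts, PySem.Str.slice S (some s) (some (s + L)) ∉ seen) ∧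
        (starts.map (fun s => PySem.Str.slice S (some s) (some (s + L)))).Nodup) := by
  intro starts
  induction starts with
  | nil => intro seen _; simp [searchLoopA]
  | cons s rest ih =>
    intro seen hpos
    rw [searchLoopA]
    by_cases hc : PySem.Set.contains seen (PySem.Str.slice S (some s) (some (s + L))) = true
    · rw [if_pos hc]
      have hs : (0:Int) ≤ s := hpos s (by simp)
      constructor
      · intro h; omega
      · rintro ⟨h1, -⟩
        exact absurd (PySem.Set.contains_iff _ _ |>.mp hc) (h1 s (by simp))
    · rw [if_neg hc]
      have hns : PySem.Str.slice S (some s) (some (s + L)) ∉ seen := by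
        intro hmem; exact hc ((PySem.Set.contains_iff _ _).mpr hmem)
      rw [ih _ (fun x hx => hpos x (by simp [hx]))]
      simp only [List.map_cons, List.nodup_cons, List.mem_cons, List.mem_map,
        PySem.Set.mem_add, forall_eq_or_imp]
      constructor
      · rintro ⟨h1, h2⟩
        refine ⟨⟨hns, fun x hx hmem => (h1 x hx) (Or.inl hmem)⟩, fun hx => ?_, h2⟩
        obtain ⟨x, hx, hex⟩ := hx
        exact (h1 x hx) (Or.inr hex)
      · rintro ⟨⟨-, h1⟩, h2, h3⟩
        refine ⟨fun x hx h => ?_, h3⟩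
        rcases h with h | h
        · exact h1 x hx h
        · exact h2 ⟨x, hx, h⟩

-- the mathematical "a length-L substring repeats"
def repN (cs : List Char) (L : Nat) : Prop :=
  ∃ i j : Nat, i < j ∧ j + L ≤ cs.length ∧ (cs.drop i).take L = (cs.drop j).take L

theorem searchA_neg_one_iff (S : String) (L : Int) (hL : 1 ≤ L) :
    (searchA L (PySem.Str.len S) S = -1 ↔ ¬ repN S.toList L.toNat) := by
  have hlen := PySem.Str.len_eq S
  rw [searchA, searchLoopA_neg_one_iff S L _ _
    (fun s hs => (PySem.List.mem_pyRange_one.mp hs).1)]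
  have hempty : ∀ s ∈ PySem.List.pyRange 0 (PySem.Str.len S - L + 1) 1,
      PySem.Str.slice S (some s) (some (s + L)) ∉ (PySem.Set.empty : PySem.Set String) := by
    intro s _ h
    simp [PySem.Set.empty] at h
  rw [iff_true_intro hempty, true_and, PySem.List.pyRange_one]
  set m : Nat := (PySem.Str.len S - L + 1 - 0).toNat with hm
  have hslice : ∀ k : Nat, ((0:Int) + (k : Int)) = (k : Int) := by intro k; ring
  have key : ∀ a b : Nat, (PySem.Str.slice S (some (a:Int)) (some ((a:Int) + L))
      = PySem.Str.slice S (some (b:Int)) (some ((b:Int) + L)))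
      ↔ ((S.toList.drop a).take L.toNat = (S.toList.drop b).take L.toNat) := by
    intro a b
    rw [← String.toList_inj, PySem.Str.toList_slice, PySem.Str.toList_slice,
      PySem.Chars.slice_eq_listSlice, PySem.Chars.slice_eq_listSlice,
      show (a:Int) + L = (a:Int) + (L.toNat : Int) from by omega,
      show (b:Int) + L = (b:Int) + (L.toNat : Int) from by omega,
      PySem.List.slice_natCast_add, PySem.List.slice_natCast_add]
  constructor
  · intro hnd hrep
    obtain ⟨i, j, hij, hjL, heq⟩ := hrep
    have hjm : j < m := by omega
    have him : i < m := by omega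
    have hne := List.pairwise_iff_getElem.mp hnd i j
      (by simpa using him) (by simpa using hjm) hij
    simp only [List.getElem_map, List.getElem_range] at hne
    exact hne (by rw [hslice i, hslice j, key i j]; exact heq)
  · intro hnr
    rw [List.Nodup, List.pairwise_iff_getElem]
    intro a b ha hb hab
    simp only [List.length_map, List.length_range] at ha hb
    simp only [List.getElem_map, List.getElem_range]
    rw [hslice a, hslice b]
    intro heq
    rw [key a b] at heq
    exact hnr ⟨a, b, hab, by omega, heq⟩

-- B as one max-fold over the flattened pair list
def pairLcp (S : String) (i j : Int) : Int := lcpLoopB S i j (PySem.Str.len S) 0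

def pairList (S : String) : List Int :=
  (PySem.List.pyRange 0 (PySem.Str.len S) 1).flatMap (fun i =>
    (PySem.List.pyRange (i + 1) (PySem.Str.len S) 1).map (fun j => pairLcp S i j))

theorem foldl_max_mem (t : List Int) (a : Int) :
    t.foldl max a = a ∨ t.foldl max a ∈ t := by
  induction t generalizing a with
  | nil => left; rfl
  | cons x xs ih =>
    rw [List.foldl_cons]
    rcases ih (max a x) with h | h
    · rcases max_choice a x with hm | hm
      · left; rw [h, hm]
      · right; rw [h, hm]; simp
    · right; simp [h]

theorem alt_eq_foldl_max (S : String) :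
    doit_binary_search_alt S = (pairList S).foldl max 0 := by
  show (PySem.List.pyRange 0 (PySem.Str.len S) 1).foldl (fun best i =>
    (PySem.List.pyRange (i + 1) (PySem.Str.len S) 1).foldl (fun best j =>
      let k := lcpLoopB S i j (PySem.Str.len S) 0
      if k > best then k else best) best) 0 = (pairList S).foldl max 0
  rw [pairList, List.foldl_flatMap]
  congr 1
  funext best i
  rw [List.foldl_map]
  congr 1
  funext b j
  show (if lcpLoopB S i j (PySem.Str.len S) 0 > b then lcpLoopB S i j (PySem.Str.len S) 0 else b)
      = max b (pairLcp S i j)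
  rw [pairLcp, max_def]
  split_ifs <;> omega

theorem mem_pairList (S : String) (v : Int) :
    v ∈ pairList S ↔ ∃ i j : Int, 0 ≤ i ∧ i < j ∧ j < PySem.Str.len S ∧ v = pairLcp S i j := by
  simp only [pairList, List.mem_flatMap, List.mem_map, PySem.List.mem_pyRange_one]
  constructor
  · rintro ⟨i, ⟨hi0, hin⟩, j, ⟨hj1, hjn⟩, hv⟩
    exact ⟨i, j, hi0, by omega, hjn, hv.symm⟩
  · rintro ⟨i, j, hi0, hij, hjn, hv⟩
    exact ⟨i, ⟨hi0, by omega⟩, j, ⟨by omega, hjn⟩, hv.symm⟩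

-- the central characterisation: A's per-length probe succeeds iff L is at most B's answer
theorem key_char (S : String) (L : Int) (hL : 1 ≤ L) (_hLn : L ≤ PySem.Str.len S) :
    (searchA L (PySem.Str.len S) S ≠ -1 ↔ L ≤ doit_binary_search_alt S) := by
  have hlen := PySem.Str.len_eq S
  rw [alt_eq_foldl_max]
  constructor
  · intro hs
    have hrep : repN S.toList L.toNat := by
      by_contra hnr
      exact hs ((searchA_neg_one_iff S L hL).mpr hnr)
    obtain ⟨i, j, hij, hjL, heq⟩ := hrep
    have hlcp : L.toNat ≤ lcpN (S.toList.drop i) (S.toList.drop j) := by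
      rw [← take_eq_take_iff_lcpN L.toNat _ _ (by simp only [List.length_drop]; omega) (by simp only [List.length_drop]; omega)]
      exact heq
    have hv : pairLcp S (i:Int) (j:Int) = (lcpN (S.toList.drop i) (S.toList.drop j) : Int) := by
      rw [pairLcp, lcpLoopB_eq S i j (by omega)]
    have hmem : pairLcp S (i:Int) (j:Int) ∈ pairList S := by
      rw [mem_pairList]
      exact ⟨i, j, by omega, by omega, by omega, rfl⟩
    have hub := (PySem.List.le_foldl_max (pairList S) 0).2 _ hmem
    omega
  · intro hLK
    have hmem : (pairList S).foldl max 0 ∈ pairList S := by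
      rcases foldl_max_mem (pairList S) 0 with h | h
      · omega
      · exact h
    rw [mem_pairList] at hmem
    obtain ⟨i, j, hi0, hij, hjn, hv⟩ := hmem
    have hic : ((i.toNat : Nat) : Int) = i := by omega
    have hjc : ((j.toNat : Nat) : Int) = j := by omega
    have hveq : (pairList S).foldl max 0
        = (lcpN (S.toList.drop i.toNat) (S.toList.drop j.toNat) : Int) := by
      rw [hv, ← hic, ← hjc, pairLcp, lcpLoopB_eq S i.toNat j.toNat (by omega), Int.toNat_natCast, Int.toNat_natCast]
    have hble : lcpN (S.toList.drop i.toNat) (S.toList.drop j.toNat)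
        ≤ S.toList.length - j.toNat := by
      have h := lcpN_le (S.toList.drop i.toNat) (S.toList.drop j.toNat)
      simpa using h
    have hrep : repN S.toList L.toNat := by
      refine ⟨i.toNat, j.toNat, by omega, by omega, ?_⟩
      rw [take_eq_take_iff_lcpN L.toNat _ _ (by simp only [List.length_drop]; omega) (by simp only [List.length_drop]; omega)]
      omega
    intro hsearch
    exact (searchA_neg_one_iff S L hL).mp hsearch hrep

theorem alt_nonneg (S : String) : 0 ≤ doit_binary_search_alt S := by
  rw [alt_eq_foldl_max]
  exact (PySem.List.le_foldl_max (pairList S) 0).1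

theorem alt_le_len (S : String) : doit_binary_search_alt S ≤ PySem.Str.len S := by
  have hlen := PySem.Str.len_eq S
  rw [alt_eq_foldl_max]
  rcases foldl_max_mem (pairList S) 0 with h | h
  · omega
  · rw [mem_pairList] at h
    obtain ⟨i, j, hi0, hij, hjn, hv⟩ := h
    have hic : ((i.toNat : Nat) : Int) = i := by omega
    have hjc : ((j.toNat : Nat) : Int) = j := by omega
    rw [hv, ← hic, ← hjc, pairLcp, lcpLoopB_eq S i.toNat j.toNat (by omega)]
    have hble := lcpN_le (S.toList.drop i.toNat) (S.toList.drop j.toNat)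
    simp only [List.length_drop] at hble
    omega

-- binary-search loop: with a downward-closed probe characterised by K it returns K
theorem bsLoopA_eq (S : String) (n K : Int)
    (hchar : ∀ L : Int, 1 ≤ L → L ≤ n → (searchA L n S ≠ -1 ↔ L ≤ K)) :
    ∀ (m : Nat) (lo hi : Int), (hi + 1 - lo).toNat ≤ m → 1 ≤ lo → hi ≤ n →
      lo - 1 ≤ K → K ≤ hi → bsLoopA S n lo hi = K := by
  intro m
  induction m with
  | zero =>
    intro lo hi hm h1 h2 h3 h4
    rw [bsLoopA, dif_neg (show ¬ lo ≤ hi from by omega)]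
    omega
  | succ m ih =>
    intro lo hi hm h1 h2 h3 h4
    by_cases hlh : lo ≤ hi
    · rw [bsLoopA, dif_pos hlh]
      show (if searchA (lo + PySem.Int.floordiv (hi - lo) 2) n S ≠ -1
          then bsLoopA S n (lo + PySem.Int.floordiv (hi - lo) 2 + 1) hi
          else bsLoopA S n lo (lo + PySem.Int.floordiv (hi - lo) 2 - 1)) = K
      have hfd : PySem.Int.floordiv (hi - lo) 2 = (hi - lo) / 2 :=
        PySem.Int.floordiv_eq_ediv_of_pos (by norm_num)
      set L := lo + PySem.Int.floordiv (hi - lo) 2 with hLdef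
      have hLlo : lo ≤ L := by rw [hLdef, hfd]; omega
      have hLhi : L ≤ hi := by rw [hLdef, hfd]; omega
      by_cases hs : searchA L n S ≠ -1
      · rw [if_pos hs]
        have hLK : L ≤ K := (hchar L (by omega) (by omega)).mp hs
        exact ih (L + 1) hi (by omega) (by omega) h2 (by omega) h4
      · rw [if_neg hs]
        have hKL : ¬ (L ≤ K) := fun hc => hs ((hchar L (by omega) (by omega)).mpr hc)
        exact ih lo (L - 1) (by omega) h1 (by omega) h3 (by omega)
    · rw [bsLoopA, dif_neg hlh]
      omega

-- ===== VERDICT (by name: the statement is the Claim_ definition above) =====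
theorem doit_binary_search_spec : Claim_equal_doit_binary_search := by
  intro S _
  show doit_binary_search S = doit_binary_search_alt S
  have hlen := PySem.Str.len_eq S
  have hK0 := alt_nonneg S
  exact bsLoopA_eq S (PySem.Str.len S) (doit_binary_search_alt S)
    (fun L hL hLn => key_char S L hL hLn)
    (PySem.Str.len S).toNat 1 (PySem.Str.len S)
    (by omega) le_rfl le_rfl (by omega) (alt_le_len S)
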